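-- pv_equiv track=rewrite | github.com/rajasagashe/allennlp | scripts/java/compare_datasets.py | indent
-- ===== SOURCE A (Python) =====
-- def indent(code):
--     newlists = [[]]
--     for tok in code:
--         newlists[-1].append(tok)
--         if tok == '{' or tok == ';' or tok == '}':
--             newlists.append([])
--     indent = 0
--     pretty = ""
--     for x in newlists:
--         if '}' in x:
--             indent -= 1
--         pretty += ('\t' * indent) + ' '.join(x) + "\n"
--         if '{' in x:
--             indent += 1
--     return pretty
-- ===== SOURCE B (Python) =====
-- def indent(code):
--     # single pass: keep the current line and the indent level, emit lines on the fly
--     pretty = ""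
--     line = []
--     ind = 0
--     for tok in code:
--         line.append(tok)
--         if tok == '{' or tok == ';' or tok == '}':
--             if tok == '}':
--                 ind -= 1
--             pretty += '\t' * ind + ' '.join(line) + '\n'
--             if tok == '{':
--                 ind += 1
--             line = []
--     return pretty + '\t' * ind + ' '.join(line) + '\n'
-- ===== Notes on version B (the rewrite author's own statement) =====
-- stated objective: simpler
-- what changed: B replaces A's two passes (build a list-of-lists of line segments, then re-scan each segment with membership tests for '{'/'}') by one pass over the tokens that keeps only the current line and the running indent and emits each finished line immediately.
import Mathlib
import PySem

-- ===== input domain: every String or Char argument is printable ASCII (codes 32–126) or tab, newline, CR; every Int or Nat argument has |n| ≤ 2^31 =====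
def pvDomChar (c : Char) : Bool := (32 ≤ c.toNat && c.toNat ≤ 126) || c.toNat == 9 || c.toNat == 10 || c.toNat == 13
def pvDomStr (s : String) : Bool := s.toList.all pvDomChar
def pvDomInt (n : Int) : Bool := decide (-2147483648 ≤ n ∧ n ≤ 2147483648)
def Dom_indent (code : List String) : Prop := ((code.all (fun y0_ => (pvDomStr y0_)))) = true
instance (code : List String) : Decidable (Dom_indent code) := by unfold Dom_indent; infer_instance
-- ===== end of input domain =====

-- B replaces A's two passes (split into a list-of-lists, then re-scan each segment) by a single
-- pass that keeps the current line and the running indent and emits lines on the fly (objective: simpler).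


-- shared Python-string primitives, over List Char (string building is done on the code-point list side, exact)
-- '\t' * n  (empty for n ≤ 0, exactly as Python)
def pvTabs (n : Int) : List Char := List.replicate n.toNat '\t'
-- ' '.join(xs)
def pvJoinSp (xs : List String) : List Char := PySem.Chars.join [' '] (xs.map String.toList)

-- ===== PORT A =====
-- newlists[-1].append(tok): append tok to the last sublist
def pvAppendLast (acc : List (List String)) (tok : String) : List (List String) :=
  match acc with
  | [] => []
  | [x] => [x ++ [tok]]
  | x :: xs => x :: pvAppendLast xs tok

def indent (code : List String) : String :=
  let newlists := code.foldl (fun acc tok =>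
      let acc' := pvAppendLast acc tok
      if tok = "{" ∨ tok = ";" ∨ tok = "}" then acc' ++ [[]] else acc') [[]]
  let r := newlists.foldl (fun (s : Int × List Char) x =>
      let ind1 := if "}" ∈ x then s.1 - 1 else s.1
      let pretty := s.2 ++ pvTabs ind1 ++ pvJoinSp x ++ ['\n']
      (if "{" ∈ x then ind1 + 1 else ind1, pretty)) ((0 : Int), ([] : List Char))
  String.ofList r.2

-- ===== PORT B =====
def indent_alt (code : List String) : String :=
  let s := code.foldl (fun (s : List Char × List String × Int) tok =>
      let line := s.2.1 ++ [tok]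
      if tok = "{" ∨ tok = ";" ∨ tok = "}" then
        let i := if tok = "}" then s.2.2 - 1 else s.2.2
        (s.1 ++ pvTabs i ++ pvJoinSp line ++ ['\n'], ([] : List String),
         if tok = "{" then i + 1 else i)
      else (s.1, line, s.2.2)) (([] : List Char), ([] : List String), (0 : Int))
  String.ofList (s.1 ++ pvTabs s.2.2 ++ pvJoinSp s.2.1 ++ ['\n'])

-- ===== PRECONDITION & SPEC =====
def Spec_indent (code : List String) (out : String) : Prop := out = indent_alt code
instance (code : List String) (out : String) : Decidable (Spec_indent code out) := by unfold Spec_indent; infer_instance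

-- ===== CLAIM (what is proved, stated in full; the proofs are below) =====
def Claim_equal_indent : Prop := ∀ (code : List String), Dom_indent code → Spec_indent code (indent code)

-- ===== LEMMAS AND PROOFS =====

-- the list of line segments A's first loop builds, starting from a partial segment `cur`
def pvSegs (cur : List String) : List String → List (List String)
  | [] => [cur]
  | t :: r =>
    if t = "{" ∨ t = ";" ∨ t = "}" then (cur ++ [t]) :: pvSegs [] r
    else pvSegs (cur ++ [t]) r

-- what A's second loop appends for a list of segments, given the incoming indent
def pvRender : List (List String) → Int → List Char
  | [], _ => []
  | x :: xs, ind =>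
    let i1 := if "}" ∈ x then ind - 1 else ind
    pvTabs i1 ++ pvJoinSp x ++ ['\n'] ++ pvRender xs (if "{" ∈ x then i1 + 1 else i1)

-- B's loop in structural-recursion form
def pvBLoop : (List Char × List String × Int) → List String → List Char × List String × Int
  | st, [] => st
  | (p, line, ind), t :: r =>
    if t = "{" ∨ t = ";" ∨ t = "}" then
      let i := if t = "}" then ind - 1 else ind
      pvBLoop (p ++ pvTabs i ++ pvJoinSp (line ++ [t]) ++ ['\n'], [], if t = "{" then i + 1 else i) r
    else pvBLoop (p, line ++ [t], ind) r

theorem pvFoldl_eq_pvBLoop (code : List String) (st : List Char × List String × Int) :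
    code.foldl (fun (s : List Char × List String × Int) tok =>
      let line := s.2.1 ++ [tok]
      if tok = "{" ∨ tok = ";" ∨ tok = "}" then
        let i := if tok = "}" then s.2.2 - 1 else s.2.2
        (s.1 ++ pvTabs i ++ pvJoinSp line ++ ['\n'], ([] : List String),
         if tok = "{" then i + 1 else i)
      else (s.1, line, s.2.2)) st = pvBLoop st code := by
  induction code generalizing st with
  | nil => rfl
  | cons t r ih =>
    obtain ⟨p, line, ind⟩ := st
    simp only [List.foldl_cons, pvBLoop]
    split_ifs with h <;> exact ih _

theorem pvAppendLast_append (pre : List (List String)) (cur : List String) (t : String) :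
    pvAppendLast (pre ++ [cur]) t = pre ++ [cur ++ [t]] := by
  induction pre with
  | nil => rfl
  | cons p pre ih =>
    cases pre with
    | nil => simp [pvAppendLast]
    | cons q pre => simpa [pvAppendLast] using ih

theorem pvPhase1_eq_segs (code : List String) (pre : List (List String)) (cur : List String) :
    code.foldl (fun acc tok =>
      let acc' := pvAppendLast acc tok
      if tok = "{" ∨ tok = ";" ∨ tok = "}" then acc' ++ [[]] else acc') (pre ++ [cur])
    = pre ++ pvSegs cur code := by
  induction code generalizing pre cur with
  | nil => simp [pvSegs]
  | cons t r ih =>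
    simp only [List.foldl_cons, pvAppendLast_append, pvSegs]
    by_cases h : t = "{" ∨ t = ";" ∨ t = "}"
    · simp only [if_pos h]
      have := ih (pre ++ [cur ++ [t]]) []
      simpa using this
    · simp only [if_neg h]
      exact ih pre (cur ++ [t])

theorem pvPhase2_eq_render (xs : List (List String)) (ind : Int) (p : List Char) :
    (xs.foldl (fun (s : Int × List Char) x =>
      let ind1 := if "}" ∈ x then s.1 - 1 else s.1
      let pretty := s.2 ++ pvTabs ind1 ++ pvJoinSp x ++ ['\n']
      (if "{" ∈ x then ind1 + 1 else ind1, pretty)) (ind, p)).2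
    = p ++ pvRender xs ind := by
  induction xs generalizing ind p with
  | nil => simp [pvRender]
  | cons x xs ih =>
    simp only [List.foldl_cons, pvRender]
    rw [ih]
    simp [List.append_assoc]

-- the single pass computes exactly pvRender of the segment list, as long as the pending
-- line `cur` contains no delimiter token
theorem pvBLoop_eq_render (code : List String) (cur : List String) (ind : Int) (p : List Char)
    (hcur : ∀ t ∈ cur, ¬ (t = "{" ∨ t = ";" ∨ t = "}")) :
    (pvBLoop (p, cur, ind) code).1 ++ pvTabs (pvBLoop (p, cur, ind) code).2.2
      ++ pvJoinSp (pvBLoop (p, cur, ind) code).2.1 ++ ['\n']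
    = p ++ pvRender (pvSegs cur code) ind := by
  induction code generalizing cur ind p with
  | nil =>
    have h1 : ¬ ("}" ∈ cur) := fun h => hcur _ h (Or.inr (Or.inr rfl))
    have h2 : ¬ ("{" ∈ cur) := fun h => hcur _ h (Or.inl rfl)
    simp [pvBLoop, pvSegs, pvRender, h1, List.append_assoc]
  | cons t r ih =>
    by_cases h : t = "{" ∨ t = ";" ∨ t = "}"
    · have h1 : ("}" ∈ cur ++ [t]) ↔ t = "}" := by
        simp only [List.mem_append, List.mem_singleton]
        constructor
        · rintro (hm | hm)
          · exact absurd (Or.inr (Or.inr rfl)) (hcur _ hm)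
          · exact hm.symm
        · intro ht; right; exact ht.symm
      have h2 : ("{" ∈ cur ++ [t]) ↔ t = "{" := by
        simp only [List.mem_append, List.mem_singleton]
        constructor
        · rintro (hm | hm)
          · exact absurd (Or.inl rfl) (hcur _ hm)
          · exact hm.symm
        · intro ht; right; exact ht.symm
      simp only [pvBLoop, if_pos h, pvSegs, pvRender, h1, h2]
      rw [ih _ _ _ (by simp)]
      simp [List.append_assoc]
    · have hcur' : ∀ s ∈ cur ++ [t], ¬ (s = "{" ∨ s = ";" ∨ s = "}") := by
        intro s hs
        rcases List.mem_append.mp hs with hs | hs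
        · exact hcur _ hs
        · rwa [List.mem_singleton.mp hs]
      simp only [pvBLoop, if_neg h, pvSegs]
      exact ih _ _ _ hcur'

-- ===== VERDICT (by name: the statement is the Claim_ definition above) =====
theorem indent_spec : Claim_equal_indent := by
  intro code _
  unfold Spec_indent indent indent_alt
  rw [pvFoldl_eq_pvBLoop]
  have hA : (code.foldl (fun acc tok =>
      let acc' := pvAppendLast acc tok
      if tok = "{" ∨ tok = ";" ∨ tok = "}" then acc' ++ [[]] else acc') [[]])
      = pvSegs [] code := by
    simpa using pvPhase1_eq_segs code [] []
  simp only [hA, pvPhase2_eq_render]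
  rw [pvBLoop_eq_render code [] 0 [] (by simp)]
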